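-- pv_equiv track=rewrite | github.com/DilipSams/Trading | Trading/alphago_trading_system.py | _year_axis
-- ===== SOURCE A (Python) =====
-- def _year_axis(ds_dates, n, label_width, indent=4):
--     """Build an X-axis string with year labels at year-boundary positions."""
--     if ds_dates is None or len(ds_dates) < 2:
--         return None
--     # Extract year from each date string (YYYY-MM-DD)
--     years = [d[:4] for d in ds_dates]
--     # Find positions where year changes
--     markers = []  # [(column, year_str), ...]
--     markers.append((0, years[0]))
--     for i in range(1, len(years)):
--         if years[i] != years[i - 1]:
--             markers.append((i, years[i]))
--     # Build label line — skip labels that would overlap or extend past chart edge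
--     axis = [" "] * n
--     last_end = -2  # position after last placed label
--     for col, yr in markers:
--         if col < last_end + 1:      # need at least 1 space gap
--             continue
--         if col + len(yr) > n:       # would be truncated at chart edge
--             continue
--         for j, ch in enumerate(yr):
--             axis[col + j] = ch
--         last_end = col + len(yr)
--     pad = " " * indent
--     return f"{pad}{' ' * label_width}  {''.join(axis)}"
-- ===== SOURCE B (Python) =====
-- def _year_axis(ds_dates, n, label_width, indent=4):
--     """Build an X-axis string with year labels at year-boundary positions.
--     Single pass over the dates, appending to a growing string instead of
--     writing into a preallocated character buffer via a markers list."""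
--     if ds_dates is None or len(ds_dates) < 2:
--         return None
--     s = ""
--     prev = None
--     for i, d in enumerate(ds_dates):
--         yr = d[:4]
--         if i == 0 or yr != prev:
--             if (s == "" or i > len(s)) and i + len(yr) <= n:
--                 s += " " * (i - len(s)) + yr
--         prev = yr
--     s += " " * (n - len(s))
--     return f"{' ' * indent}{' ' * label_width}  {s}"
-- ===== Notes on version B (the rewrite author's own statement) =====
-- stated objective: simpler
-- what changed: Replaces A's three-phase structure (build a markers list, preallocate a blank character buffer, write label chars into it by index) with one fused pass over the dates that detects year boundaries via the previous year prefix and appends gap-spaces plus the label to a growing string, padding to width n at the end.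
import Mathlib
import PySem

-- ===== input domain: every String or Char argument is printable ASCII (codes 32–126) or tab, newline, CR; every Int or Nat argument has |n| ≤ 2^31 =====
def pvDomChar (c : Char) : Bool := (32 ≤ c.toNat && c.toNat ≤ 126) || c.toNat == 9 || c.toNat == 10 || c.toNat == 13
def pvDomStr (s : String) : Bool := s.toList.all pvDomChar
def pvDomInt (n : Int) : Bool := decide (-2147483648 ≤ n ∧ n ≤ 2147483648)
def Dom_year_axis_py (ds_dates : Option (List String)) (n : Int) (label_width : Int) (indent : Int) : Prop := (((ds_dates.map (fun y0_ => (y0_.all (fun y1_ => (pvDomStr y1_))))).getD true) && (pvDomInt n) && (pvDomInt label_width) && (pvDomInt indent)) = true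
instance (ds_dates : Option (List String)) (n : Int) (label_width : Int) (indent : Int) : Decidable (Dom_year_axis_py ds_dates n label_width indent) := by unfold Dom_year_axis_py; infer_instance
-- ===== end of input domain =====

-- ===== PORT A =====
-- B differs from A by one fused pass that concatenates labels into a growing string
-- instead of A's markers list plus character-buffer writes; objective: simpler.

-- ' ' * k  (empty for k ≤ 0); exact for Python's string repetition
def pvSpaces (k : Int) : List Char := List.replicate k.toNat ' '

-- inner loop `for j, ch in enumerate(yr): axis[col + j] = ch` (positions are in range at every call site)
def pvWrite : List Char → Nat → List Char → List Char
  | ax, _, [] => ax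
  | ax, p, c :: cs => pvWrite (ax.set p c) (p + 1) cs

-- `for i in range(1, len(years)): if years[i] != years[i-1]: markers.append((i, years[i]))`
def pvMarkers : List Char → List (List Char) → Int → List (Int × List Char)
  | _, [], _ => []
  | prev, y :: ys, i =>
    if y ≠ prev then (i, y) :: pvMarkers y ys (i + 1) else pvMarkers y ys (i + 1)

-- `for col, yr in markers: …`
def pvPlace : List Char → Int → Int → List (Int × List Char) → List Char
  | ax, _, _, [] => ax
  | ax, lastEnd, n, (col, yr) :: ms =>
    if col < lastEnd + 1 then pvPlace ax lastEnd n ms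
    else if col + (yr.length : Int) > n then pvPlace ax lastEnd n ms
    else pvPlace (pvWrite ax col.toNat yr) (col + (yr.length : Int)) n ms

def year_axis_py (ds_dates : Option (List String)) (n : Int) (label_width : Int) (indent : Int) : Option String :=
  match ds_dates with
  | none => none
  | some ds =>
    if (ds.length : Int) < 2 then none
    else
      let years := ds.map (fun d => d.toList.take 4)   -- d[:4]
      let markers :=
        match years with
        | [] => []                                      -- unreachable: len(ds) ≥ 2
        | y :: ys => ((0 : Int), y) :: pvMarkers y ys 1
      let axis := pvPlace (List.replicate n.toNat ' ') (-2) n markers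
      some (String.ofList (pvSpaces indent ++ pvSpaces label_width ++ [' ', ' '] ++ axis))

-- ===== PORT B =====
-- `for i, d in enumerate(ds_dates): …` carrying the growing label string s and the previous year
def pvBLoop : List Char → Option (List Char) → Int → Int → List String → List Char
  | s, _, _, _, [] => s
  | s, prev, i, n, d :: ds =>
    let yr := d.toList.take 4
    if i = 0 ∨ some yr ≠ prev then
      if (s = [] ∨ (s.length : Int) < i) ∧ i + (yr.length : Int) ≤ n then
        pvBLoop (s ++ pvSpaces (i - (s.length : Int)) ++ yr) (some yr) (i + 1) n ds
      else pvBLoop s (some yr) (i + 1) n ds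
    else pvBLoop s (some yr) (i + 1) n ds

def year_axis_py_alt (ds_dates : Option (List String)) (n : Int) (label_width : Int) (indent : Int) : Option String :=
  match ds_dates with
  | none => none
  | some ds =>
    if (ds.length : Int) < 2 then none
    else
      let s := pvBLoop [] none 0 n ds
      let s := s ++ pvSpaces (n - (s.length : Int))
      some (String.ofList (pvSpaces indent ++ pvSpaces label_width ++ [' ', ' '] ++ s))

-- ===== PRECONDITION & SPEC =====
def Spec_year_axis_py (ds_dates : Option (List String)) (n : Int) (label_width : Int) (indent : Int) (out : Option String) : Prop := out = year_axis_py_alt ds_dates n label_width indent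
instance (ds_dates : Option (List String)) (n : Int) (label_width : Int) (indent : Int) (out : Option String) : Decidable (Spec_year_axis_py ds_dates n label_width indent out) := by unfold Spec_year_axis_py; infer_instance

-- ===== CLAIM (what is proved, stated in full; the proofs are below) =====
def Claim_equal_year_axis_py : Prop := ∀ (ds_dates : Option (List String)) (n : Int) (label_width : Int) (indent : Int), Dom_year_axis_py ds_dates n label_width indent → Spec_year_axis_py ds_dates n label_width indent (year_axis_py ds_dates n label_width indent)

-- ===== LEMMAS AND PROOFS =====

-- final padding: B's Int-counted pad equals A's Nat-counted remainder
lemma pvSpaces_sub (n : Int) (t : List Char) (h : t.length ≤ n.toNat) :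
    pvSpaces (n - (t.length : Int)) = List.replicate (n.toNat - t.length) ' ' := by
  simp only [pvSpaces]
  rw [show (n - (t.length : Int)).toNat = n.toNat - t.length from by omega]


-- writing yr char-by-char into the all-blank region right after `front` = append
lemma pvWrite_front : ∀ (y front : List Char) (m : Nat), y.length ≤ m →
    pvWrite (front ++ List.replicate m ' ') front.length y
      = front ++ y ++ List.replicate (m - y.length) ' '
  | [], front, m, _ => by simp [pvWrite]
  | c :: cs, front, m, h => by
    obtain ⟨k, rfl⟩ : ∃ k, m = k + 1 := ⟨m - 1, by simp at h; omega⟩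
    have hset : (front ++ List.replicate (k + 1) ' ').set front.length c
        = (front ++ [c]) ++ List.replicate k ' ' := by
      simp [List.replicate_succ]
    have ih := pvWrite_front cs (front ++ [c]) k (by simp at h; omega)
    rw [show (front ++ [c]).length = front.length + 1 by simp] at ih
    simp only [pvWrite]
    rw [hset, ih]
    simp [List.append_assoc, Nat.succ_sub_succ]

-- the fused B loop simulates A's marker-placement loop from any related state
lemma pvMain : ∀ (ds : List String) (prev s : List Char) (lastEnd i n : Int),
    1 ≤ i → s.length ≤ n.toNat →
    ((s = [] ∧ lastEnd ≤ 0) ∨ (s ≠ [] ∧ lastEnd = (s.length : Int))) →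
    (pvBLoop s (some prev) i n ds).length ≤ n.toNat ∧
    pvPlace (s ++ List.replicate (n.toNat - s.length) ' ') lastEnd n
        (pvMarkers prev (ds.map (fun d => d.toList.take 4)) i)
      = (pvBLoop s (some prev) i n ds)
          ++ List.replicate (n.toNat - (pvBLoop s (some prev) i n ds).length) ' ' := by
  intro ds
  induction ds with
  | nil => intro prev s lastEnd i n h1 h2 _; simpa [pvBLoop, pvMarkers, pvPlace] using h2
  | cons d ds ih =>
    intro prev s lastEnd i n h1 hlen hinv
    set y := d.toList.take 4 with hy
    by_cases hne : y = prev
    · -- not a year boundary: both loops are no-ops on the placement state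
      have hm : pvMarkers prev ((d :: ds).map (fun d => d.toList.take 4)) i
          = pvMarkers y (ds.map (fun d => d.toList.take 4)) (i + 1) := by
        simp only [List.map_cons, pvMarkers, ← hy]
        rw [if_neg (not_not_intro hne)]
      have hb : pvBLoop s (some prev) i n (d :: ds)
          = pvBLoop s (some y) (i + 1) n ds := by
        have hnc : ¬ (i = 0 ∨ some y ≠ some prev) := by
          intro h
          rcases h with h0 | hne2
          · omega
          · exact hne2 (by simp [hne])
        simp only [pvBLoop, ← hy]
        rw [if_neg hnc]
      rw [hm, hb]
      exact ih y s lastEnd (i + 1) n (by omega) hlen hinv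
    · -- year boundary at column i
      have hm : pvMarkers prev ((d :: ds).map (fun d => d.toList.take 4)) i
          = (i, y) :: pvMarkers y (ds.map (fun d => d.toList.take 4)) (i + 1) := by
        simp only [List.map_cons, pvMarkers, ← hy]
        rw [if_pos hne]
      have hcond : (i = 0 ∨ some y ≠ some prev) := Or.inr (by simp [hne])
      by_cases hG : (s = [] ∨ (s.length : Int) < i) ∧ i + (y.length : Int) ≤ n
      · -- place the label on both sides
        have hb : pvBLoop s (some prev) i n (d :: ds)
            = pvBLoop (s ++ pvSpaces (i - (s.length : Int)) ++ y) (some y) (i + 1) n ds := by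
          simp only [pvBLoop, ← hy]
          rw [if_pos hcond, if_pos hG]
        obtain ⟨hgap, hfit⟩ := hG
        have hskip : ¬ i < lastEnd + 1 := by
          rcases hinv with ⟨he, hle⟩ | ⟨hne', hle⟩
          · omega
          · rcases hgap with he | hlt
            · exact absurd he hne'
            · omega
        have hsk : s.length ≤ i.toNat := by
          rcases hgap with he | hlt
          · simp [he]
          · omega
        have hkn : i.toNat + y.length ≤ n.toNat := by omega
        have hsplit : List.replicate (n.toNat - s.length) (' ' : Char)
            = List.replicate (i.toNat - s.length) (' ' : Char)
              ++ List.replicate (n.toNat - i.toNat) (' ' : Char) := by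
          rw [← List.replicate_add]; congr 1; omega
        have hfrontlen : (s ++ List.replicate (i.toNat - s.length) (' ' : Char)).length
            = i.toNat := by simp; omega
        have hwrite : pvWrite (s ++ List.replicate (n.toNat - s.length) ' ') i.toNat y
            = (s ++ List.replicate (i.toNat - s.length) ' ') ++ y
              ++ List.replicate (n.toNat - i.toNat - y.length) ' ' := by
          have h1 := pvWrite_front y (s ++ List.replicate (i.toNat - s.length) ' ')
            (n.toNat - i.toNat) (by omega)
          rw [hfrontlen] at h1
          rw [hsplit, ← List.append_assoc, h1]
        have hs' : s ++ pvSpaces (i - (s.length : Int)) ++ y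
            = s ++ List.replicate (i.toNat - s.length) ' ' ++ y := by
          simp only [pvSpaces]
          congr 3
          omega
        have hs'len : (s ++ pvSpaces (i - (s.length : Int)) ++ y).length
            = i.toNat + y.length := by
          simp [pvSpaces]; omega
        have hAstep : pvPlace (s ++ List.replicate (n.toNat - s.length) ' ') lastEnd n
              ((i, y) :: pvMarkers y (ds.map (fun d => d.toList.take 4)) (i + 1))
            = pvPlace ((s ++ pvSpaces (i - (s.length : Int)) ++ y)
                ++ List.replicate (n.toNat
                    - (s ++ pvSpaces (i - (s.length : Int)) ++ y).length) ' ')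
                (i + (y.length : Int)) n
                (pvMarkers y (ds.map (fun d => d.toList.take 4)) (i + 1)) := by
          simp only [pvPlace]
          rw [if_neg hskip, if_neg (by omega), hwrite]
          congr 1
          rw [hs'len, ← hs']
          congr 2
          omega
        rw [hm, hAstep, hb]
        refine ih y _ (i + (y.length : Int)) (i + 1) n (by omega) (by rw [hs'len]; omega) ?_
        refine Or.inr ⟨?_, ?_⟩
        · intro hc
          have hc' := congrArg List.length hc
          rw [hs'len] at hc'
          simp at hc'
          omega
        · rw [hs'len]; push_cast; omega
      · -- skipped on both sides (overlap or does not fit)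
        have hb : pvBLoop s (some prev) i n (d :: ds)
            = pvBLoop s (some y) (i + 1) n ds := by
          simp only [pvBLoop, ← hy]
          rw [if_pos hcond, if_neg hG]
        have hAstep : pvPlace (s ++ List.replicate (n.toNat - s.length) ' ') lastEnd n
              ((i, y) :: pvMarkers y (ds.map (fun d => d.toList.take 4)) (i + 1))
            = pvPlace (s ++ List.replicate (n.toNat - s.length) ' ') lastEnd n
                (pvMarkers y (ds.map (fun d => d.toList.take 4)) (i + 1)) := by
          rcases not_and_or.mp hG with hng | hnf
          · have hne' : s ≠ [] := fun h => hng (Or.inl h)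
            have hge : ¬ ((s.length : Int) < i) := fun h => hng (Or.inr h)
            have hle : lastEnd = (s.length : Int) := by
              rcases hinv with ⟨he, _⟩ | ⟨_, hle⟩
              · exact absurd he hne'
              · exact hle
            simp only [pvPlace]
            rw [if_pos (by omega)]
          · simp only [pvPlace]
            split
            · rfl
            · rw [if_pos (by omega)]
        rw [hm, hAstep, hb]
        exact ih y s lastEnd (i + 1) n (by omega) hlen hinv

-- ===== VERDICT (by name: the statement is the Claim_ definition above) =====
theorem year_axis_py_spec : Claim_equal_year_axis_py := by
  intro ds_dates n label_width indent _
  unfold Spec_year_axis_py year_axis_py year_axis_py_alt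
  cases ds_dates with
  | none => rfl
  | some ds =>
    simp only
    by_cases hlen : (ds.length : Int) < 2
    · rw [if_pos hlen, if_pos hlen]
    · rw [if_neg hlen, if_neg hlen]
      obtain ⟨d0, dtail, rfl⟩ : ∃ d0 dtail, ds = d0 :: dtail := by
        cases ds with
        | nil => simp at hlen
        | cons a l => exact ⟨a, l, rfl⟩
      set y0 := d0.toList.take 4 with hy0
      have hb0 : pvBLoop [] none 0 n (d0 :: dtail)
          = if ((y0.length : Int)) ≤ n
            then pvBLoop y0 (some y0) 1 n dtail
            else pvBLoop [] (some y0) 1 n dtail := by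
        by_cases hfit : ((y0.length : Int)) ≤ n
        · rw [if_pos hfit]
          simp [pvBLoop, pvSpaces, ← hy0, hfit]
        · rw [if_neg hfit]
          simp [pvBLoop, ← hy0, hfit]
      by_cases hfit : ((y0.length : Int)) ≤ n
      · -- first label placed
        have hw : pvWrite (List.replicate n.toNat ' ') 0 y0
            = y0 ++ List.replicate (n.toNat - y0.length) ' ' := by
          have h1 := pvWrite_front y0 [] n.toNat (by omega)
          simpa using h1
        have hmain := pvMain dtail y0 y0 ((y0.length : Int)) 1 n (by omega)
          (by omega)
          (by
            by_cases hz : y0 = []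
            · exact Or.inl ⟨hz, by simp [hz]⟩
            · exact Or.inr ⟨hz, by simp⟩)
        have hA : pvPlace (List.replicate n.toNat ' ') (-2) n
              (((0 : Int), y0) :: pvMarkers y0 (dtail.map (fun d => d.toList.take 4)) 1)
            = pvPlace (y0 ++ List.replicate (n.toNat - y0.length) ' ')
                ((y0.length : Int)) n
                (pvMarkers y0 (dtail.map (fun d => d.toList.take 4)) 1) := by
          simp only [pvPlace]
          rw [if_neg (by omega), if_neg (by omega)]
          simp only [Int.toNat_zero, hw, zero_add]
        rw [hb0, if_pos hfit]
        congr 2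
        simp only [List.map_cons, ← hy0]
        rw [hA, hmain.2, pvSpaces_sub n _ hmain.1]
      · -- first label does not fit: both skip it
        have hmain := pvMain dtail y0 [] (-2) 1 n (by omega) (by simp)
          (Or.inl ⟨rfl, by omega⟩)
        have hA : pvPlace (List.replicate n.toNat ' ') (-2) n
              (((0 : Int), y0) :: pvMarkers y0 (dtail.map (fun d => d.toList.take 4)) 1)
            = pvPlace (([] : List Char) ++ List.replicate (n.toNat - ([] : List Char).length) ' ')
                (-2) n (pvMarkers y0 (dtail.map (fun d => d.toList.take 4)) 1) := by
          simp only [pvPlace]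
          rw [if_neg (by omega), if_pos (by omega)]
          simp
        rw [hb0, if_neg hfit]
        congr 2
        simp only [List.map_cons, ← hy0]
        rw [hA, hmain.2, pvSpaces_sub n _ hmain.1]
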